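-- pv_equiv track=rewrite | github.com/hilakhadad/ElectricPatterns | experiment_analysis/src/metrics/classification_quality.py | _check_cross_iteration_overlaps
-- ===== SOURCE A (Python) =====
-- from collections import defaultdict
-- from typing import Dict, Any, List, Optional
--
-- def _check_cross_iteration_overlaps(matched: List[Dict]) -> int:
--     """Count activations from different iterations that overlap on the same phase."""
--     # Group by phase
--     by_phase = defaultdict(list)
--     for a in matched:
--         phase = a.get('phase', '')
--         by_phase[phase].append(a)
--
--     overlap_count = 0
--     for phase, phase_acts in by_phase.items():
--         # Sort by start time
--         sorted_acts = sorted(phase_acts, key=lambda x: x.get('on_start', ''))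
--         for i in range(len(sorted_acts) - 1):
--             a1 = sorted_acts[i]
--             a2 = sorted_acts[i + 1]
--             # Check if different iterations overlap
--             if a1.get('iteration') != a2.get('iteration'):
--                 if a1.get('off_end', '') > a2.get('on_start', ''):
--                     overlap_count += 1
--
--     return overlap_count
-- ===== SOURCE B (Python) =====
-- def _check_cross_iteration_overlaps(matched):
--     """Count activations from different iterations that overlap on the same phase."""
--     s = sorted(matched, key=lambda a: (a.get('phase', ''), a.get('on_start', '')))
--     overlap_count = 0
--     for prev, cur in zip(s, s[1:]):
--         if (prev.get('phase', '') == cur.get('phase', '')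
--                 and prev.get('iteration') != cur.get('iteration')
--                 and prev.get('off_end', '') > cur.get('on_start', '')):
--             overlap_count += 1
--     return overlap_count
-- ===== Notes on version B (the rewrite author's own statement) =====
-- stated objective: simpler
-- what changed: Replaces the defaultdict grouping plus per-group sort and index loop by one global stable sort on the composite key (phase, on_start) followed by a single flat pass over adjacent pairs guarded by phase equality.
import Mathlib
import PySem

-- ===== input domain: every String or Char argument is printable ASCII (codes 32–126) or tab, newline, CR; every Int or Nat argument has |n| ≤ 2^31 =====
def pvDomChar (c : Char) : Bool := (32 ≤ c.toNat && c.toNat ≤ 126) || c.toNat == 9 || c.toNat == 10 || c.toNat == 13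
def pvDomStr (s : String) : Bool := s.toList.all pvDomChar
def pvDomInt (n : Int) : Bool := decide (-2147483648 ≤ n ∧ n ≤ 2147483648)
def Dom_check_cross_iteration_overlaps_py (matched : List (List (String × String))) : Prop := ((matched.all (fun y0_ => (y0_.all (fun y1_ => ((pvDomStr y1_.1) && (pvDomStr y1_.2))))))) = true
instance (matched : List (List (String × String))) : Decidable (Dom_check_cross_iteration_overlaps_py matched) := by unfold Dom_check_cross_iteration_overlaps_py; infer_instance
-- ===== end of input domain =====

-- B replaces A's defaultdict grouping + per-group sort and index loop by one global stable
-- sort on the composite key (phase, on_start) and a single flat pass over adjacent pairs.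


-- ===== PORT A =====
-- a.get(k, '') on a dict represented as an association list (first match), used by both ports
def pvGetS (a : List (String × String)) (k : String) : String :=
  PySem.Dict.getD (PySem.Dict.mk a) k ""
-- a.get(k) (default None)
def pvGetO (a : List (String × String)) (k : String) : Option String :=
  PySem.Dict.get? (PySem.Dict.mk a) k

def check_cross_iteration_overlaps_py (matched : List (List (String × String))) : Int :=
  -- by_phase = defaultdict(list); for a in matched: by_phase[a.get('phase','')].append(a)
  let by_phase : PySem.Dict String (List (List (String × String))) :=
    matched.foldl (fun d a => d.modify (pvGetS a "phase") [] (fun l => l ++ [a])) PySem.Dict.empty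
  -- for phase, phase_acts in by_phase.items(): … ; for i in range(len(sorted_acts)-1): …
  by_phase.items.foldl (fun overlap_count pr =>
    let sorted_acts := PySem.List.sorted pr.2 (fun x => pvGetS x "on_start")
    (PySem.List.pyRange 0 ((sorted_acts.length : Int) - 1) 1).foldl (fun oc i =>
      let a1 := PySem.List.pyGetD sorted_acts i []
      let a2 := PySem.List.pyGetD sorted_acts (i + 1) []
      if pvGetO a1 "iteration" ≠ pvGetO a2 "iteration" then
        if pvGetS a1 "off_end" > pvGetS a2 "on_start" then oc + 1 else oc
      else oc) overlap_count) 0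

-- ===== PORT B =====
def check_cross_iteration_overlaps_py_alt (matched : List (List (String × String))) : Int :=
  -- s = sorted(matched, key=lambda a: (a.get('phase',''), a.get('on_start','')))
  let s := PySem.List.sorted2 matched (fun a => pvGetS a "phase") (fun a => pvGetS a "on_start")
  -- for prev, cur in zip(s, s[1:]): if …: overlap_count += 1
  (s.zip (PySem.List.slice s (some 1) none)).foldl (fun overlap_count pr =>
    if pvGetS pr.1 "phase" = pvGetS pr.2 "phase" ∧
       pvGetO pr.1 "iteration" ≠ pvGetO pr.2 "iteration" ∧
       pvGetS pr.1 "off_end" > pvGetS pr.2 "on_start" then overlap_count + 1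
    else overlap_count) 0

-- ===== PRECONDITION & SPEC =====
def Spec_check_cross_iteration_overlaps_py (matched : List (List (String × String))) (out : Int) : Prop := out = check_cross_iteration_overlaps_py_alt matched
instance (matched : List (List (String × String))) (out : Int) : Decidable (Spec_check_cross_iteration_overlaps_py matched out) := by unfold Spec_check_cross_iteration_overlaps_py; infer_instance

-- ===== CLAIM (what is proved, stated in full; the proofs are below) =====
def Claim_equal_check_cross_iteration_overlaps_py : Prop := ∀ (matched : List (List (String × String))), Dom_check_cross_iteration_overlaps_py matched → Spec_check_cross_iteration_overlaps_py matched (check_cross_iteration_overlaps_py matched)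

-- ===== LEMMAS AND PROOFS =====

-- the two key projections and the two pair tests
def pvK1 (a : List (String × String)) : String := pvGetS a "phase"
def pvK2 (a : List (String × String)) : String := pvGetS a "on_start"

theorem pvK1_def : pvK1 = fun a => pvGetS a "phase" := rfl

def pvHitA (a1 a2 : List (String × String)) : Int :=
  if pvGetO a1 "iteration" ≠ pvGetO a2 "iteration" then
    if pvGetS a1 "off_end" > pvGetS a2 "on_start" then 1 else 0
  else 0

def pvHitB (a1 a2 : List (String × String)) : Int :=
  if pvK1 a1 = pvK1 a2 ∧ pvGetO a1 "iteration" ≠ pvGetO a2 "iteration" ∧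
     pvGetS a1 "off_end" > pvGetS a2 "on_start" then 1 else 0

-- adjacent-pair counters (no phase guard / with phase guard)
def pvCA : List (List (String × String)) → Int
  | [] => 0
  | [_] => 0
  | a :: b :: t => pvHitA a b + pvCA (b :: t)

def pvCB : List (List (String × String)) → Int
  | [] => 0
  | [_] => 0
  | a :: b :: t => pvHitB a b + pvCB (b :: t)

-- the lexicographic before-predicate of sorted2 and the second-key predicate
def pvLt (a b : List (String × String)) : Bool :=
  decide (pvK1 a < pvK1 b) || (!decide (pvK1 b < pvK1 a) && decide (pvK2 a < pvK2 b))
def pvLtK2 (a b : List (String × String)) : Bool := decide (pvK2 a < pvK2 b)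

theorem pvHitB_eq_hitA (a b : List (String × String)) (h : pvK1 a = pvK1 b) :
    pvHitB a b = pvHitA a b := by
  unfold pvHitA pvHitB
  by_cases h1 : pvGetO a "iteration" ≠ pvGetO b "iteration" <;>
    by_cases h2 : pvGetS a "off_end" > pvGetS b "on_start" <;>
      simp [h, h1, h2]

theorem pvFlatMap_congr {l : List String} {f g : String → List (List (String × String))}
    (h : ∀ q ∈ l, f q = g q) : l.flatMap f = l.flatMap g := by
  rw [List.flatMap_def, List.flatMap_def, List.map_congr_left h]

-- B's zip loop is pvCB
theorem pvFoldZip (l : List (List (String × String))) (z : Int) :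
    (l.zip l.tail).foldl (fun c pr =>
      if pvGetS pr.1 "phase" = pvGetS pr.2 "phase" ∧
         pvGetO pr.1 "iteration" ≠ pvGetO pr.2 "iteration" ∧
         pvGetS pr.1 "off_end" > pvGetS pr.2 "on_start" then c + 1 else c) z = z + pvCB l := by
  induction l generalizing z with
  | nil => simp [pvCB]
  | cons a t ih =>
    cases t with
    | nil => simp [pvCB]
    | cons b t' =>
      simp only [List.tail_cons, List.zip_cons_cons, List.foldl_cons] at ih ⊢
      rw [ih]
      simp only [pvCB, pvHitB, pvK1]
      split <;> ring

-- A's index loop is pvCA, Nat version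
theorem pvFoldRangeAux (l : List (List (String × String))) (z : Int) :
    (List.range (l.length - 1)).foldl (fun oc k =>
      if pvGetO (l.getD k []) "iteration" ≠ pvGetO (l.getD (k + 1) []) "iteration" then
        if pvGetS (l.getD k []) "off_end" > pvGetS (l.getD (k + 1) []) "on_start" then oc + 1 else oc
      else oc) z = z + pvCA l := by
  induction l generalizing z with
  | nil => simp [pvCA]
  | cons a t ih =>
    cases t with
    | nil => simp [pvCA]
    | cons b t' =>
      have hlen : (a :: b :: t').length - 1 = t'.length + 1 := by simp
      rw [hlen, List.range_succ_eq_map, List.foldl_cons, List.foldl_map]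
      have ih' := ih (z := if pvGetO a "iteration" ≠ pvGetO b "iteration" then
          if pvGetS a "off_end" > pvGetS b "on_start" then z + 1 else z else z)
      simp only [List.length_cons, Nat.add_sub_cancel] at ih'
      simp only [Nat.succ_eq_add_one, List.getD_cons_succ, List.getD_cons_zero] at ih' ⊢
      rw [ih']
      simp only [pvCA]
      unfold pvHitA
      split <;> (try split) <;> ring

-- A's index loop is pvCA
theorem pvFoldRange (l : List (List (String × String))) (z : Int) :
    (PySem.List.pyRange 0 ((l.length : Int) - 1) 1).foldl (fun oc i =>
      if pvGetO (PySem.List.pyGetD l i []) "iteration" ≠ pvGetO (PySem.List.pyGetD l (i + 1) []) "iteration" then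
        if pvGetS (PySem.List.pyGetD l i []) "off_end" > pvGetS (PySem.List.pyGetD l (i + 1) []) "on_start"
        then oc + 1 else oc
      else oc) z = z + pvCA l := by
  cases l with
  | nil =>
    simp only [List.length_nil, Nat.cast_zero, zero_sub, pvCA]
    rw [show PySem.List.pyRange 0 (-1) 1 = [] from by decide]
    simp
  | cons a t =>
    have hcast : (((a :: t).length : Int)) - 1 = ((t.length : Nat) : Int) := by
      simp
    rw [hcast, PySem.List.pyRange_zero_natCast, List.foldl_map]
    simp only [← Nat.cast_add_one, PySem.List.pyGetD_natCast]
    have h := pvFoldRangeAux (a :: t) z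
    simpa using h

-- insertBy helpers
theorem pvInsertBy_skip (bef : List (String × String) → List (String × String) → Bool)
    (x : List (String × String)) (u v : List (List (String × String)))
    (h : ∀ y ∈ u, bef x y = false) :
    PySem.List.insertBy bef x (u ++ v) = u ++ PySem.List.insertBy bef x v := by
  induction u with
  | nil => rfl
  | cons y u' ih =>
    simp only [List.cons_append, PySem.List.insertBy, h y (List.mem_cons_self),
      Bool.false_eq_true, if_false]
    rw [ih (fun y hy => h y (List.mem_cons_of_mem _ hy))]

theorem pvInsertBy_front (bef : List (String × String) → List (String × String) → Bool)
    (x : List (String × String)) (l : List (List (String × String)))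
    (h : ∀ y ∈ l, bef x y = true) :
    PySem.List.insertBy bef x l = x :: l := by
  cases l with
  | nil => rfl
  | cons y l' => simp [PySem.List.insertBy, h y (List.mem_cons_self)]

theorem pvInsertBy_block (x : List (String × String)) (b r : List (List (String × String)))
    (hb : ∀ y ∈ b, pvK1 y = pvK1 x) (hr : ∀ z ∈ r, pvK1 x < pvK1 z) :
    PySem.List.insertBy pvLt x (b ++ r) = PySem.List.insertBy pvLtK2 x b ++ r := by
  induction b with
  | nil =>
    cases r with
    | nil => rfl
    | cons z r' =>
      have hlt : pvLt x z = true := by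
        unfold pvLt
        simp [hr z (List.mem_cons_self)]
      simp [PySem.List.insertBy, hlt]
  | cons y b' ih =>
    have hxy : pvLt x y = pvLtK2 x y := by
      unfold pvLt pvLtK2
      rw [hb y (List.mem_cons_self)]
      simp
    by_cases hk : pvLtK2 x y = true
    · simp [PySem.List.insertBy, hxy, hk]
    · have hk' : pvLtK2 x y = false := by revert hk; cases pvLtK2 x y <;> simp
      simp only [List.cons_append, PySem.List.insertBy, hxy, hk', Bool.false_eq_true, if_false]
      rw [ih (fun y hy => hb y (List.mem_cons_of_mem _ hy))]

-- inserting one element into the flatMap-of-blocks normal form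
theorem pvINS (ps : List String) (g : String → List (List (String × String)))
    (x : List (String × String))
    (hps : ps.Pairwise (· < ·))
    (hg : ∀ q ∈ ps, ∀ y ∈ g q, pvK1 y = q)
    (hx : pvK1 x ∈ ps ∨ g (pvK1 x) = []) :
    PySem.List.insertBy pvLt x (ps.flatMap g) =
      (if pvK1 x ∈ ps then ps else PySem.List.insertBy (fun a b => decide (a < b)) (pvK1 x) ps).flatMap
        (fun q => if q = pvK1 x then PySem.List.insertBy pvLtK2 x (g q) else g q) := by
  induction ps with
  | nil =>
    have hgp : g (pvK1 x) = [] := by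
      rcases hx with h | h
      · simp at h
      · exact h
    have hnm : ¬ pvK1 x ∈ ([] : List String) := by simp
    rw [if_neg hnm]
    simp [PySem.List.insertBy, hgp]
  | cons q ps' ih =>
    rcases lt_trichotomy (pvK1 x) q with hlt | heq | hgt
    · -- new smallest phase: x goes in front
      have hnotin : pvK1 x ∉ q :: ps' := by
        intro hmem
        rcases List.mem_cons.mp hmem with h | h
        · exact absurd h (ne_of_lt hlt)
        · exact absurd ((List.pairwise_cons.mp hps).1 _ h) (not_lt_of_gt hlt)
      have hgp : g (pvK1 x) = [] := by
        rcases hx with h | h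
        · exact absurd h hnotin
        · exact h
      have hfront : ∀ y ∈ (q :: ps').flatMap g, pvLt x y = true := by
        intro y hy
        rcases List.mem_flatMap.mp hy with ⟨r, hr, hyr⟩
        have h1 : pvK1 y = r := hg r hr y hyr
        have h2 : pvK1 x < r := by
          rcases List.mem_cons.mp hr with h | h
          · exact h ▸ hlt
          · exact lt_trans hlt ((List.pairwise_cons.mp hps).1 _ h)
        unfold pvLt
        rw [h1]
        simp [h2]
      rw [pvInsertBy_front _ _ _ hfront, if_neg hnotin]
      have hins : PySem.List.insertBy (fun a b => decide (a < b)) (pvK1 x) (q :: ps') =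
          pvK1 x :: q :: ps' := by
        simp [PySem.List.insertBy, hlt]
      rw [hins]
      have hqx : ¬ q = pvK1 x := fun h => hnotin (by rw [← h]; exact List.mem_cons_self)
      have hcong' : ps'.flatMap
            (fun r => if r = pvK1 x then PySem.List.insertBy pvLtK2 x (g r) else g r) =
          ps'.flatMap g :=
        pvFlatMap_congr (fun r hr => if_neg (fun h => hnotin (by rw [← h]; exact List.mem_cons_of_mem _ hr)))
      simp [List.flatMap_cons, hgp, PySem.List.insertBy, hcong', hqx]
    · -- existing phase: insert inside its block
      have hin : pvK1 x ∈ q :: ps' := heq ▸ List.mem_cons_self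
      rw [if_pos hin, List.flatMap_cons, List.flatMap_cons]
      have hb : ∀ y ∈ g q, pvK1 y = pvK1 x :=
        fun y hy => (hg q (List.mem_cons_self) y hy).trans heq.symm
      have hr : ∀ z ∈ ps'.flatMap g, pvK1 x < pvK1 z := by
        intro z hz
        rcases List.mem_flatMap.mp hz with ⟨r, hrr, hzr⟩
        rw [hg r (List.mem_cons_of_mem _ hrr) z hzr, heq]
        exact (List.pairwise_cons.mp hps).1 _ hrr
      rw [pvInsertBy_block x (g q) _ hb hr, if_pos heq.symm]
      have hcong : ps'.flatMap
            (fun r => if r = pvK1 x then PySem.List.insertBy pvLtK2 x (g r) else g r) =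
          ps'.flatMap g := by
        apply pvFlatMap_congr
        intro r hr'
        apply if_neg
        intro h
        exact absurd (h.trans heq) (ne_of_gt ((List.pairwise_cons.mp hps).1 _ hr'))
      rw [hcong]
    · -- the first block keeps its place; recurse
      have hskip : ∀ y ∈ g q, pvLt x y = false := by
        intro y hy
        have h1 := hg q (List.mem_cons_self) y hy
        unfold pvLt
        rw [h1]
        simp [not_lt_of_gt hgt, hgt]
      rw [List.flatMap_cons, pvInsertBy_skip pvLt x _ _ hskip]
      have hps' := (List.pairwise_cons.mp hps).2
      have hx' : pvK1 x ∈ ps' ∨ g (pvK1 x) = [] := by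
        rcases hx with h | h
        · rcases List.mem_cons.mp h with h1 | h1
          · exact absurd h1 (ne_of_gt hgt)
          · exact Or.inl h1
        · exact Or.inr h
      have ih' := ih hps' (fun r hr y hy => hg r (List.mem_cons_of_mem _ hr) y hy) hx'
      rw [ih']
      by_cases hmem : pvK1 x ∈ ps'
      · have hin : pvK1 x ∈ q :: ps' := List.mem_cons_of_mem _ hmem
        rw [if_pos hmem, if_pos hin, List.flatMap_cons, if_neg (ne_of_lt hgt)]
      · have hnin : pvK1 x ∉ q :: ps' := by
          intro h
          rcases List.mem_cons.mp h with h1 | h1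
          · exact absurd h1 (ne_of_gt hgt)
          · exact hmem h1
        rw [if_neg hmem, if_neg hnin]
        have hins : PySem.List.insertBy (fun a b => decide (a < b)) (pvK1 x) (q :: ps') =
            q :: PySem.List.insertBy (fun a b => decide (a < b)) (pvK1 x) ps' := by
          simp [PySem.List.insertBy, not_lt_of_gt hgt]
        rw [hins, List.flatMap_cons, if_neg (ne_of_lt hgt)]

-- appending one element to a stable sort is one insertion
theorem pvSorted2_append (xs : List (List (String × String))) (x : List (String × String)) :
    PySem.List.sorted2 (xs ++ [x]) (fun a => pvGetS a "phase") (fun a => pvGetS a "on_start") =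
      PySem.List.insertBy pvLt x
        (PySem.List.sorted2 xs (fun a => pvGetS a "phase") (fun a => pvGetS a "on_start")) := by
  unfold PySem.List.sorted2
  simp only [List.foldl_append, List.foldl_cons, List.foldl_nil]
  rfl

theorem pvSorted_append {α κ : Type} [LinearOrder κ] (l : List α) (x : α) (key : α → κ) :
    PySem.List.sorted (l ++ [x]) key =
      PySem.List.insertBy (fun a b => decide (key a < key b)) x (PySem.List.sorted l key) := by
  rw [PySem.List.sorted_eq_foldl_insertBy, PySem.List.sorted_eq_foldl_insertBy, List.foldl_append]
  rfl

-- the global stable sort is the concatenation of the per-phase sorted groups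
theorem pvCHAR (matched : List (List (String × String))) :
    PySem.List.sorted2 matched (fun a => pvGetS a "phase") (fun a => pvGetS a "on_start") =
      (PySem.List.sorted (PySem.Set.ofList (matched.map pvK1)) (fun q => q) false).flatMap
        (fun q => PySem.List.sorted (matched.filter (fun a => pvK1 a == q))
          (fun x => pvGetS x "on_start") false) := by
  induction matched using List.reverseRecOn with
  | nil => rfl
  | append_singleton xs x ih =>
    rw [pvSorted2_append, ih]
    have hps := PySem.List.sorted_ofList_pairwise_lt (xs.map pvK1)
    have hg : ∀ q ∈ PySem.List.sorted (PySem.Set.ofList (xs.map pvK1)) (fun q => q) false,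
        ∀ y ∈ PySem.List.sorted (xs.filter (fun a => pvK1 a == q))
            (fun x => pvGetS x "on_start") false, pvK1 y = q := by
      intro q _ y hy
      rw [PySem.List.mem_sorted] at hy
      simpa using (List.mem_filter.mp hy).2
    have hx : pvK1 x ∈ PySem.List.sorted (PySem.Set.ofList (xs.map pvK1)) (fun q => q) false ∨
        PySem.List.sorted (xs.filter (fun a => pvK1 a == pvK1 x))
          (fun x => pvGetS x "on_start") false = [] := by
      by_cases hmem : pvK1 x ∈ xs.map pvK1
      · exact Or.inl ((PySem.List.mem_sorted _ _ _ _).mpr ((PySem.Set.mem_ofList _ _).mpr hmem))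
      · refine Or.inr ?_
        have hfil : xs.filter (fun a => pvK1 a == pvK1 x) = [] := by
          rw [List.filter_eq_nil_iff]
          intro a ha hbeq
          exact hmem (by
            have : pvK1 a = pvK1 x := by simpa using hbeq
            exact this ▸ List.mem_map_of_mem ha)
        rw [hfil]
        rfl
    rw [pvINS _ _ x hps hg hx]
    have hmapapp : (xs ++ [x]).map pvK1 = xs.map pvK1 ++ [pvK1 x] := by simp
    rw [hmapapp, PySem.Set.ofList_append_singleton]
    by_cases hmem : pvK1 x ∈ xs.map pvK1
    · have hmemS : pvK1 x ∈ PySem.Set.ofList (xs.map pvK1) :=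
        (PySem.Set.mem_ofList _ _).mpr hmem
      have hmemPs : pvK1 x ∈ PySem.List.sorted (PySem.Set.ofList (xs.map pvK1)) (fun q => q) false :=
        (PySem.List.mem_sorted _ _ _ _).mpr hmemS
      rw [PySem.Set.add_of_mem hmemS, if_pos hmemPs]
      apply pvFlatMap_congr
      intro q hq
      by_cases hq' : q = pvK1 x
      · have hfil : (xs ++ [x]).filter (fun a => pvK1 a == q) =
            xs.filter (fun a => pvK1 a == q) ++ [x] := by
          simp [List.filter_append, hq']
        rw [if_pos hq', hfil, hq']
        exact (pvSorted_append _ x _).symm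
      · have hfil : (xs ++ [x]).filter (fun a => pvK1 a == q) =
            xs.filter (fun a => pvK1 a == q) := by
          have : (pvK1 x == q) = false := by
            simp
            exact fun h => hq' h.symm
          simp [List.filter_append, this]
        rw [if_neg hq', hfil]
    · have hmemS : pvK1 x ∉ PySem.Set.ofList (xs.map pvK1) :=
        fun h => hmem ((PySem.Set.mem_ofList _ _).mp h)
      have hmemPs : pvK1 x ∉ PySem.List.sorted (PySem.Set.ofList (xs.map pvK1)) (fun q => q) false :=
        fun h => hmemS ((PySem.List.mem_sorted _ _ _ _).mp h)
      rw [PySem.Set.add_of_not_mem hmemS, if_neg hmemPs]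
      have hsorted_add : PySem.List.sorted (PySem.Set.ofList (xs.map pvK1) ++ [pvK1 x]) (fun q => q) false =
          PySem.List.insertBy (fun a b => decide (a < b)) (pvK1 x)
            (PySem.List.sorted (PySem.Set.ofList (xs.map pvK1)) (fun q => q) false) :=
        pvSorted_append _ _ _
      rw [hsorted_add]
      apply pvFlatMap_congr
      intro q hq
      by_cases hq' : q = pvK1 x
      · have hfil : (xs ++ [x]).filter (fun a => pvK1 a == q) =
            xs.filter (fun a => pvK1 a == q) ++ [x] := by
          simp [List.filter_append, hq']
        rw [if_pos hq', hfil, hq']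
        exact (pvSorted_append _ x _).symm
      · have hfil : (xs ++ [x]).filter (fun a => pvK1 a == q) =
            xs.filter (fun a => pvK1 a == q) := by
          have : (pvK1 x == q) = false := by
            simp
            exact fun h => hq' h.symm
          simp [List.filter_append, this]
        rw [if_neg hq', hfil]

-- counting with the phase guard over a phase-homogeneous block splits off
theorem pvSplit (p : String) (u v : List (List (String × String)))
    (hu : ∀ y ∈ u, pvK1 y = p) (hv : ∀ z ∈ v, pvK1 z ≠ p) :
    pvCB (u ++ v) = pvCA u + pvCB v := by
  induction u with
  | nil => simp [pvCA]
  | cons a u' ih =>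
    cases u' with
    | nil =>
      cases v with
      | nil => simp [pvCA, pvCB]
      | cons z v' =>
        have hza : pvHitB a z = 0 := by
          unfold pvHitB
          rw [if_neg]
          rintro ⟨h1, -, -⟩
          exact hv z (List.mem_cons_self) (h1 ▸ hu a (List.mem_cons_self))
        simp only [List.singleton_append, pvCB, pvCA, hza]
        try omega
    | cons b u'' =>
      have hab : pvK1 a = pvK1 b :=
        (hu a (List.mem_cons_self)).trans (hu b (List.mem_cons_of_mem _ (List.mem_cons_self))).symm
      simp only [List.cons_append, pvCB, pvCA]
      have := ih (fun y hy => hu y (List.mem_cons_of_mem _ hy))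
      simp only [List.cons_append] at this
      rw [this, pvHitB_eq_hitA a b hab]
      ring

theorem pvBlocks (ps : List String) (g : String → List (List (String × String)))
    (hnd : ps.Nodup) (hg : ∀ q ∈ ps, ∀ y ∈ g q, pvK1 y = q) :
    pvCB (ps.flatMap g) = (ps.map (fun q => pvCA (g q))).sum := by
  induction ps with
  | nil => simp [pvCB]
  | cons q ps' ih =>
    rw [List.flatMap_cons]
    have hv : ∀ z ∈ ps'.flatMap g, pvK1 z ≠ q := by
      intro z hz
      rcases List.mem_flatMap.mp hz with ⟨r, hr, hzr⟩
      rw [hg r (List.mem_cons_of_mem _ hr) z hzr]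
      exact fun h => (List.nodup_cons.mp hnd).1 (h ▸ hr)
    rw [pvSplit q _ _ (hg q (List.mem_cons_self)) hv,
      ih (List.nodup_cons.mp hnd).2 (fun r hr => hg r (List.mem_cons_of_mem _ hr))]
    simp

-- A's grouping dict: keys are the distinct phases in first-occurrence order, values the filters
theorem pvItems (matched : List (List (String × String))) :
    (matched.foldl (fun d a => d.modify (pvGetS a "phase") [] (fun l => l ++ [a])) PySem.Dict.empty).items =
      (PySem.Set.ofList (matched.map pvK1)).map
        (fun q => (q, matched.filter (fun a => pvK1 a == q))) := by
  have hnd : (matched.foldl (fun d a => d.modify (pvGetS a "phase") [] (fun l => l ++ [a]))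
      PySem.Dict.empty).keys.Nodup :=
    PySem.Dict.nodup_keys_foldl_modify_key matched (fun a => pvGetS a "phase") []
      (fun _ a => (fun l => l ++ [a])) PySem.Dict.empty PySem.Dict.nodup_keys_empty
  have hkeys : (matched.foldl (fun d a => d.modify (pvGetS a "phase") [] (fun l => l ++ [a]))
      PySem.Dict.empty).keys = PySem.Set.ofList (matched.map pvK1) := by
    have h := PySem.Dict.keys_foldl_modify_key matched (fun a => pvGetS a "phase")
      ([] : List (List (String × String))) (fun _ a => (fun l => l ++ [a])) PySem.Dict.empty
    simpa [PySem.Dict.keys_empty, PySem.Set.update_nil_left, pvK1_def] using h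
  have hget : ∀ q, (matched.foldl (fun d a => d.modify (pvGetS a "phase") [] (fun l => l ++ [a]))
      PySem.Dict.empty).getD q [] = matched.filter (fun a => pvK1 a == q) := by
    intro q
    have h := PySem.Dict.getD_foldl_modify_append (matched.map (fun a => (pvK1 a, a)))
      PySem.Dict.empty q
    rw [List.foldl_map] at h
    simpa [PySem.Dict.getD_empty, List.filter_map, Function.comp_def, pvK1_def] using h
  rw [PySem.Dict.items_eq_map_keys _ hnd [], hkeys]
  exact List.map_congr_left (fun q _ => by rw [hget q])

-- ===== VERDICT (by name: the statement is the Claim_ definition above) =====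
theorem check_cross_iteration_overlaps_py_spec : Claim_equal_check_cross_iteration_overlaps_py := by
  intro matched _
  unfold Spec_check_cross_iteration_overlaps_py
  unfold check_cross_iteration_overlaps_py check_cross_iteration_overlaps_py_alt
  simp only [PySem.List.slice_from_one]
  rw [pvFoldZip, pvItems, List.foldl_map]
  simp only [pvFoldRange]
  rw [PySem.List.foldl_add, pvCHAR]
  have hps := PySem.List.sorted_ofList_pairwise_lt (matched.map pvK1)
  have hnd : (PySem.List.sorted (PySem.Set.ofList (matched.map pvK1)) (fun q => q) false).Nodup :=
    hps.imp (fun h => ne_of_lt h)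
  have hg : ∀ q ∈ PySem.List.sorted (PySem.Set.ofList (matched.map pvK1)) (fun q => q) false,
      ∀ y ∈ PySem.List.sorted (matched.filter (fun a => pvK1 a == q))
          (fun x => pvGetS x "on_start") false, pvK1 y = q := by
    intro q _ y hy
    rw [PySem.List.mem_sorted] at hy
    simpa using (List.mem_filter.mp hy).2
  rw [pvBlocks _ _ hnd hg]
  have hperm : (PySem.List.sorted (PySem.Set.ofList (matched.map pvK1)) (fun q => q) false).Perm
      (PySem.Set.ofList (matched.map pvK1)) := PySem.List.sorted_perm _ _ _
  rw [(hperm.map (fun q => pvCA (PySem.List.sorted (matched.filter (fun a => pvK1 a == q))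
    (fun x => pvGetS x "on_start") false))).sum_eq]
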